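-- pv_equiv track=rewrite | github.com/camachojaime5/bot-ajedrezChino | board.py | check_board_integrity
-- ===== SOURCE A (Python) =====
-- FEN_ROW_SEPARATOR = '/'
--
-- MAX_ROW = 9
--
-- MAX_COLUMN = 8
--
-- def check_board_integrity(state):
--     ''' Function that checks whether a board has valid information '''
--     rows = state.split(FEN_ROW_SEPARATOR)
--     if len(rows) != MAX_ROW + 1:
--         return False
--     for row in rows:
--         count = 0
--         for character in row:
--             if character.isdigit():
--                 count += int(character)
--             else:
--                 count += 1
--         if count != MAX_COLUMN + 1:
--             return False
--     return True
-- ===== SOURCE B (Python) =====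
-- def check_board_integrity(state):
--     ''' Single linear pass over the raw string: no split, count cells per row
--         and separators as we go. '''
--     sep_count = 0
--     count = 0
--     for c in state:
--         if c == '/':
--             sep_count += 1
--             if count != 9:
--                 return False
--             count = 0
--         else:
--             count += int(c) if c.isdigit() else 1
--     return sep_count == 9 and count == 9
-- ===== Notes on version B (the rewrite author's own statement) =====
-- stated objective: alternative
-- what changed: B replaces split-into-rows-then-per-row-recount with a single linear pass over the raw string that maintains a separator counter and a running per-row cell count, so no intermediate row list is built; it trades Python's C-level str.split for an explicit per-character loop.
import Mathlib
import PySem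

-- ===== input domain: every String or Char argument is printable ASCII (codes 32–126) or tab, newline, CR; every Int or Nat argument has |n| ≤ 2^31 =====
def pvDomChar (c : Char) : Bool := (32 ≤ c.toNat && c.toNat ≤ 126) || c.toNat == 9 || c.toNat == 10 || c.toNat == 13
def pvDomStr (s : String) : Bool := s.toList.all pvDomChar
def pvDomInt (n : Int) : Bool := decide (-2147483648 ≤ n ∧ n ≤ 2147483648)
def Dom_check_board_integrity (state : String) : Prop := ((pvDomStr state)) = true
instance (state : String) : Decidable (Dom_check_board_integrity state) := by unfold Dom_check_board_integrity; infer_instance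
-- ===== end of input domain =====

-- B replaces split-then-recount by one linear pass with a separator counter and a
-- running per-row count (same return value; no intermediate row list is built).

-- ===== PORT A =====
def FEN_ROW_SEPARATOR : String := "/"
def MAX_ROW : Int := 9
def MAX_COLUMN : Int := 8

-- int(character): on the ASCII domain isdigit characters are '0'..'9', so int() always
-- succeeds; `.getD 0` only totalizes `ofChars?` (never reached on Dom).
def pvIntOfChar (c : Char) : Int := (PySem.Int.ofChars? [c]).getD 0

-- inner loop of A: count += int(c) if c.isdigit() else 1
def pvRowCount (row : List Char) : Int :=
  row.foldl (fun count character =>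
    if PySem.Chars.isdigit character then count + pvIntOfChar character else count + 1) 0

-- outer loop of A with its early return
def pvCheckRows : List (List Char) → Bool
  | [] => true
  | row :: rest => if pvRowCount row ≠ MAX_COLUMN + 1 then false else pvCheckRows rest

def check_board_integrity (state : String) : Bool :=
  let rows := PySem.Chars.splitOn state.toList FEN_ROW_SEPARATOR.toList
  if PySem.List.len rows ≠ MAX_ROW + 1 then false
  else pvCheckRows rows

-- ===== PORT B =====
-- per-character cell value: int(c) if c.isdigit() else 1
def pvCharVal (c : Char) : Int :=
  if PySem.Chars.isdigit c then (PySem.Int.ofChars? [c]).getD 0 else 1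

-- the single pass of B, carrying sep_count and the running per-row count
def pvAltGo : List Char → Int → Int → Bool
  | [], sep_count, count => sep_count == 9 && count == 9
  | c :: rest, sep_count, count =>
      if c = '/' then
        if count ≠ 9 then false else pvAltGo rest (sep_count + 1) 0
      else
        pvAltGo rest sep_count (count + pvCharVal c)

def check_board_integrity_alt (state : String) : Bool :=
  pvAltGo state.toList 0 0

-- ===== PRECONDITION & SPEC =====
def Spec_check_board_integrity (state : String) (out : Bool) : Prop := out = check_board_integrity_alt state
instance (state : String) (out : Bool) : Decidable (Spec_check_board_integrity state out) := by unfold Spec_check_board_integrity; infer_instance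

-- ===== CLAIM (what is proved, stated in full; the proofs are below) =====
def Claim_equal_check_board_integrity : Prop := ∀ (state : String), Dom_check_board_integrity state → Spec_check_board_integrity state (check_board_integrity state)

-- ===== LEMMAS AND PROOFS =====

-- reference splitter: what state.split('/') produces, in structural form
def pvSplit : List Char → List (List Char)
  | [] => [[]]
  | c :: rest =>
      if c = '/' then [] :: pvSplit rest
      else
        match pvSplit rest with
        | [] => [[c]]
        | h :: t => (c :: h) :: t

lemma pvSplit_ne_nil (cs : List Char) : pvSplit cs ≠ [] := by
  cases cs with
  | nil => simp [pvSplit]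
  | cons c rest =>
    simp only [pvSplit]
    split_ifs
    · simp
    · cases h : pvSplit rest <;> simp

lemma splitOn_go_eq (fuel : Nat) :
    ∀ (l cur : List Char) (accs : List (List Char)), l.length ≤ fuel →
      PySem.Chars.splitOn.go ['/'] fuel l cur accs =
        accs.reverse ++ (match pvSplit l with
          | [] => [cur.reverse]
          | h :: t => (cur.reverse ++ h) :: t) := by
  induction fuel with
  | zero =>
    intro l cur accs hl
    have hl0 : l = [] := by cases l <;> simp_all
    subst hl0
    simp [PySem.Chars.splitOn.go, pvSplit]
  | succ n ih =>
    intro l cur accs hl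
    cases l with
    | nil => simp [PySem.Chars.splitOn.go, pvSplit]
    | cons c rest =>
      simp only [PySem.Chars.splitOn.go]
      by_cases hc : c = '/'
      · subst hc
        have hpre : List.isPrefixOf ['/'] ('/' :: rest) = true := by
          simp [List.isPrefixOf]
        rw [if_pos hpre]
        rw [show List.drop ['/'].length ('/' :: rest) = rest from rfl]
        simp only [List.length_cons] at hl
        rw [ih _ _ _ (by omega)]
        simp only [pvSplit]
        cases h : pvSplit rest with
        | nil => exact absurd h (pvSplit_ne_nil rest)
        | cons h' t' => simp
      · have hpre : List.isPrefixOf ['/'] (c :: rest) = false := by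
          simp [List.isPrefixOf]
          exact fun h => absurd h.symm hc
        rw [if_neg (by simp [hpre])]
        simp only [List.length_cons] at hl
        rw [ih _ _ _ (by omega)]
        simp only [pvSplit, if_neg hc]
        cases h : pvSplit rest with
        | nil => exact absurd h (pvSplit_ne_nil rest)
        | cons h' t' => simp

lemma splitOn_eq_pvSplit (cs : List Char) :
    PySem.Chars.splitOn cs ['/'] = pvSplit cs := by
  unfold PySem.Chars.splitOn
  rw [splitOn_go_eq _ _ _ _ (by omega)]
  cases h : pvSplit cs with
  | nil => exact absurd h (pvSplit_ne_nil cs)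
  | cons h' t' => simp

lemma rowCount_foldl (row : List Char) (a : Int) :
    row.foldl (fun count character =>
      if PySem.Chars.isdigit character then count + pvIntOfChar character else count + 1) a
      = a + pvRowCount row := by
  induction row generalizing a with
  | nil => simp [pvRowCount]
  | cons c r ih =>
    simp only [pvRowCount, List.foldl_cons]
    by_cases hd : PySem.Chars.isdigit c = true
    · rw [if_pos hd, if_pos hd, ih (a + pvIntOfChar c), ih (0 + pvIntOfChar c)]
      ring
    · rw [if_neg hd, if_neg hd, ih (a + 1), ih (0 + 1)]
      ring

lemma rowCount_cons (c : Char) (row : List Char) :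
    pvRowCount (c :: row) = pvCharVal c + pvRowCount row := by
  simp only [pvRowCount, List.foldl_cons]
  rw [rowCount_foldl]
  simp only [pvRowCount]
  unfold pvCharVal pvIntOfChar
  split_ifs <;> ring

def pvCheckRows' : Int → List (List Char) → Bool
  | _, [] => true
  | cnt, row :: rest => if cnt + pvRowCount row ≠ 9 then false else pvCheckRows' 0 rest

lemma altGo_eq (cs : List Char) :
    ∀ (sep cnt : Int),
      pvAltGo cs sep cnt =
        (decide (sep + (pvSplit cs).length = 10) && pvCheckRows' cnt (pvSplit cs)) := by
  induction cs with
  | nil =>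
    intro sep cnt
    simp only [pvAltGo, pvSplit, pvCheckRows', pvRowCount, List.foldl_nil,
      List.length_cons, List.length_nil]
    by_cases h9 : sep = 9 <;> by_cases hc : cnt = 9
    · subst h9; subst hc; norm_num
    · subst h9; simp [hc]
    · subst hc
      have hs : ¬ (sep + 1 = (10 : Int)) := by omega
      simp [h9, hs]
    · have hs : ¬ (sep + 1 = (10 : Int)) := by omega
      simp [h9, hc, hs]
  | cons c rest ih =>
    intro sep cnt
    by_cases hc : c = '/'
    · subst hc
      rw [show pvAltGo ('/' :: rest) sep cnt
            = (if ('/':Char) = '/' then (if cnt ≠ 9 then false else pvAltGo rest (sep + 1) 0)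
               else pvAltGo rest sep (cnt + pvCharVal '/')) from rfl,
          if_pos rfl]
      rw [show pvSplit ('/' :: rest) = [] :: pvSplit rest from by simp [pvSplit]]
      by_cases h9 : cnt = 9
      · rw [if_neg (by omega), ih]
        rw [show pvCheckRows' cnt ([] :: pvSplit rest)
              = (if cnt + pvRowCount [] ≠ 9 then false else pvCheckRows' 0 (pvSplit rest)) from rfl]
        rw [if_neg (by simp [pvRowCount]; omega)]
        simp only [List.length_cons]
        congr 1
        simp only [decide_eq_decide]
        push_cast
        omega
      · rw [if_pos h9]
        rw [show pvCheckRows' cnt ([] :: pvSplit rest)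
              = (if cnt + pvRowCount [] ≠ 9 then false else pvCheckRows' 0 (pvSplit rest)) from rfl]
        rw [if_pos (by simp [pvRowCount]; omega)]
        simp
    · rw [show pvAltGo (c :: rest) sep cnt
            = (if c = '/' then (if cnt ≠ 9 then false else pvAltGo rest (sep + 1) 0)
               else pvAltGo rest sep (cnt + pvCharVal c)) from rfl,
          if_neg hc, ih]
      rw [show pvSplit (c :: rest)
            = (if c = '/' then [] :: pvSplit rest
               else match pvSplit rest with
                 | [] => [[c]]
                 | h :: t => (c :: h) :: t) from rfl,
          if_neg hc]
      cases h : pvSplit rest with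
      | nil => exact absurd h (pvSplit_ne_nil rest)
      | cons h' t' =>
        rw [show pvCheckRows' cnt ((c :: h') :: t')
              = (if cnt + pvRowCount (c :: h') ≠ 9 then false else pvCheckRows' 0 t') from rfl,
            rowCount_cons]
        rw [show pvCheckRows' (cnt + pvCharVal c) (h' :: t')
              = (if (cnt + pvCharVal c) + pvRowCount h' ≠ 9 then false else pvCheckRows' 0 t') from rfl]
        simp only [List.length_cons]
        have harith : cnt + pvCharVal c + pvRowCount h' = cnt + (pvCharVal c + pvRowCount h') := by ring
        rw [harith]
        rfl

lemma checkRows'_zero (rows : List (List Char)) :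
    pvCheckRows' 0 rows = pvCheckRows rows := by
  induction rows with
  | nil => rfl
  | cons r rs ih =>
    simp only [pvCheckRows', pvCheckRows, MAX_COLUMN, ih]
    norm_num

-- ===== VERDICT (by name: the statement is the Claim_ definition above) =====
theorem check_board_integrity_spec : Claim_equal_check_board_integrity := by
  intro state _
  unfold Spec_check_board_integrity
  simp only [check_board_integrity, check_board_integrity_alt]
  rw [show FEN_ROW_SEPARATOR.toList = ['/'] from rfl]
  rw [splitOn_eq_pvSplit, altGo_eq]
  simp only [PySem.List.len_eq, checkRows'_zero, MAX_ROW]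
  by_cases h : (pvSplit state.toList).length = 10
  · rw [if_neg (by push_cast; omega)]
    rw [decide_eq_true (by omega)]
    simp
  · rw [if_pos (by push_cast; omega)]
    rw [decide_eq_false (by omega)]
    simp
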